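-- pv_equiv track=rewrite | github.com/Dallinger/Griduniverse | dlgr/griduniverse/maze_utils.py | positions_to_maze
-- ===== SOURCE A (Python) =====
-- def positions_to_maze(wall_positions, rows, columns):
--     maze_rows = []
--     for i in range(rows):
--         row = []
--         for j in range(columns):
--             row.append(int((i, j) in wall_positions))
--         maze_rows.append(row)
--     return maze_rows
-- ===== SOURCE B (Python) =====
-- def positions_to_maze(wall_positions, rows, columns):
--     maze_rows = [[0] * columns for _ in range(rows)]
--     for i, j in wall_positions:
--         if 0 <= i < rows and 0 <= j < columns:
--             maze_rows[i][j] = 1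
--     return maze_rows
-- ===== Notes on version B (the rewrite author's own statement) =====
-- stated objective: faster
-- what changed: Instead of scanning all rows*columns cells and testing membership of each cell in wall_positions, B allocates a zeroed grid once and makes a single pass over wall_positions, setting in-bounds cells to 1.
import Mathlib
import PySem

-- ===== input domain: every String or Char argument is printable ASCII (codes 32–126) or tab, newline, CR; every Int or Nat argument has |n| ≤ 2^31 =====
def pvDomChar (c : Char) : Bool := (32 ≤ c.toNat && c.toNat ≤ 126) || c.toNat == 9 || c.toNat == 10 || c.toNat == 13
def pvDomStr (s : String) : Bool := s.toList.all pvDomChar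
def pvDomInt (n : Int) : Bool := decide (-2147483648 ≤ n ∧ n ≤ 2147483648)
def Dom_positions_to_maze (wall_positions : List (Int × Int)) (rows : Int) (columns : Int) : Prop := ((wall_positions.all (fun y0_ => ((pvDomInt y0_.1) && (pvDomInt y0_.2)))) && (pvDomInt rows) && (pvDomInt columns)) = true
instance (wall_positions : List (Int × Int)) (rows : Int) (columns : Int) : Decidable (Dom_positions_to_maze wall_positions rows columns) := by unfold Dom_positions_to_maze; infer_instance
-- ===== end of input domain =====

-- B replaces A's per-cell membership scan (O(rows*columns*|walls|)) by allocating a zeroed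
-- grid and one pass over wall_positions setting in-bounds cells to 1 (O(rows*columns + |walls|)).

-- ===== PORT A =====
-- for i in range(rows): row = [int((i,j) in wall_positions) for j in range(columns)]
def positions_to_maze (wall_positions : List (Int × Int)) (rows : Int) (columns : Int) : List (List Int) :=
  (PySem.List.pyRange 0 rows 1).map (fun i =>
    (PySem.List.pyRange 0 columns 1).map (fun j =>
      if (i, j) ∈ wall_positions then (1 : Int) else 0))

-- ===== PORT B =====
-- the body of B's for-loop: bounds-guarded `maze_rows[i][j] = 1`
def pvSetWall (g : List (List Int)) (rows : Int) (columns : Int) (p : Int × Int) : List (List Int) :=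
  if 0 ≤ p.1 ∧ p.1 < rows ∧ 0 ≤ p.2 ∧ p.2 < columns then
    g.modify p.1.toNat (fun r => r.set p.2.toNat 1)
  else g

def positions_to_maze_alt (wall_positions : List (Int × Int)) (rows : Int) (columns : Int) : List (List Int) :=
  wall_positions.foldl (fun g p => pvSetWall g rows columns p)
    ((PySem.List.pyRange 0 rows 1).map (fun _ => List.replicate columns.toNat (0 : Int)))

-- ===== PRECONDITION & SPEC =====
def Spec_positions_to_maze (wall_positions : List (Int × Int)) (rows : Int) (columns : Int) (out : List (List Int)) : Prop := out = positions_to_maze_alt wall_positions rows columns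
instance (wall_positions : List (Int × Int)) (rows : Int) (columns : Int) (out : List (List Int)) : Decidable (Spec_positions_to_maze wall_positions rows columns out) := by unfold Spec_positions_to_maze; infer_instance

-- ===== CLAIM (what is proved, stated in full; the proofs are below) =====
def Claim_equal_positions_to_maze : Prop := ∀ (wall_positions : List (Int × Int)) (rows : Int) (columns : Int), Dom_positions_to_maze wall_positions rows columns → Spec_positions_to_maze wall_positions rows columns (positions_to_maze wall_positions rows columns)

-- ===== LEMMAS AND PROOFS =====

-- the wall-occupancy grid of an arbitrary wall list S (equals `positions_to_maze S rows columns`)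
def pvGrid (rows columns : Int) (S : List (Int × Int)) : List (List Int) :=
  (PySem.List.pyRange 0 rows 1).map (fun i =>
    (PySem.List.pyRange 0 columns 1).map (fun j =>
      if (i, j) ∈ S then (1 : Int) else 0))

theorem pvGrid_nil (rows columns : Int) :
    pvGrid rows columns [] = (PySem.List.pyRange 0 rows 1).map (fun _ => List.replicate columns.toNat 0) := by
  unfold pvGrid
  apply List.map_congr_left
  intro i _
  rw [List.eq_replicate_iff]
  constructor
  · simp [PySem.List.length_pyRange_one]
  · intro x hx
    rcases List.mem_map.1 hx with ⟨j, _, rfl⟩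
    simp

theorem pvGrid_step (rows columns a b : Int) (S : List (Int × Int)) :
    pvSetWall (pvGrid rows columns S) rows columns (a, b) = pvGrid rows columns (S ++ [(a, b)]) := by
  unfold pvSetWall pvGrid
  split_ifs with h
  · -- in-bounds: modify row a, set column b
    obtain ⟨ha0, har, hb0, hbc⟩ := h
    replace ha0 : 0 ≤ a := ha0
    replace har : a < rows := har
    replace hb0 : 0 ≤ b := hb0
    replace hbc : b < columns := hbc
    apply List.ext_getElem
    · simp
    · intro k h1 h2
      rw [List.getElem_modify]
      simp only [List.getElem_map, PySem.List.getElem_pyRange_one, zero_add]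
      by_cases hak : a.toNat = k
      · have ha : a = (k : Int) := by omega
        simp only [if_pos hak]
        apply List.ext_getElem
        · simp
        · intro l h3 h4
          rw [List.getElem_set]
          simp only [List.getElem_map, PySem.List.getElem_pyRange_one, zero_add]
          by_cases hbl : b.toNat = l
          · have hb : b = (l : Int) := by omega
            simp [List.mem_append, ha, hb]
          · have hne : ¬(((k : Int), (l : Int)) ∈ S ∨ ((k : Int) = a ∧ (l : Int) = b)) ∨
                ((k : Int), (l : Int)) ∈ S := by
              by_cases hmem : ((k : Int), (l : Int)) ∈ S
              · exact Or.inr hmem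
              · exact Or.inl (by rintro (hc | ⟨-, hc⟩); exact hmem hc; omega)
            simp only [if_neg hbl, List.mem_append, List.mem_singleton, Prod.mk.injEq]
            rcases hne with hne | hmem
            · rw [if_neg (fun hc => hne hc), if_neg (fun hc => hne (Or.inl hc))]
            · rw [if_pos hmem, if_pos (Or.inl hmem)]
      · simp only [if_neg hak]
        apply List.map_congr_left
        intro j hj
        have hne : ¬((k : Int) = a ∧ j = b) := by rintro ⟨h1', -⟩; omega
        simp only [List.mem_append, List.mem_singleton, Prod.mk.injEq]
        simp [hne]
  · -- out of bounds: (a, b) is never a cell of the grid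
    apply List.map_congr_left
    intro i hi
    have hi' := (PySem.List.mem_pyRange_one).1 hi
    apply List.map_congr_left
    intro j hj
    have hj' := (PySem.List.mem_pyRange_one).1 hj
    have hne : ¬(i = a ∧ j = b) := by
      rintro ⟨rfl, rfl⟩
      exact h ⟨hi'.1, hi'.2, hj'.1, hj'.2⟩
    simp only [List.mem_append, List.mem_singleton, Prod.mk.injEq]
    simp [hne]

theorem pvGrid_fold (rows columns : Int) :
    ∀ (ws S : List (Int × Int)),
      ws.foldl (fun g p => pvSetWall g rows columns p) (pvGrid rows columns S)
        = pvGrid rows columns (S ++ ws) := by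
  intro ws
  induction ws with
  | nil => intro S; simp
  | cons w ws ih =>
    intro S
    obtain ⟨a, b⟩ := w
    rw [List.foldl_cons, pvGrid_step, ih]
    simp

-- ===== VERDICT (by name: the statement is the Claim_ definition above) =====
theorem positions_to_maze_spec : Claim_equal_positions_to_maze := by
  intro wall_positions rows columns _
  unfold Spec_positions_to_maze positions_to_maze_alt
  rw [← pvGrid_nil, pvGrid_fold]
  simp only [List.nil_append]
  rfl
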